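-- pv_equiv track=rewrite | github.com/Null-Pointers-2-0/BOCRA-Backend | apps/core/utils.py | generate_unique_filename
-- ===== SOURCE A (Python) =====
-- def generate_unique_filename(filename, existing_files=None):
--     """
--     Generate a unique filename to avoid conflicts.
--
--     Args:
--         filename (str): Original filename
--         existing_files (list): List of existing filenames to check against
--
--     Returns:
--         str: Unique filename
--     """
--     if not existing_files:
--         existing_files = []
--
--     # If filename doesn't exist, return as-is
--     if filename not in existing_files:
--         return filename
--
--     # Split filename into name and extension
--     name, ext = filename.rsplit('.', 1) if '.' in filename else (filename, '')
--
--     counter = 1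
--     while True:
--         new_filename = f"{name}_{counter}.{ext}" if ext else f"{name}_{counter}"
--         if new_filename not in existing_files:
--             return new_filename
--         counter += 1
-- ===== SOURCE B (Python) =====
-- def generate_unique_filename(filename, existing_files=None):
--     """
--     Generate a unique filename to avoid conflicts.
--
--     One pass over existing_files collects, into a set, the variable segment of
--     every entry shaped like name_<segment>ext; the counter loop then probes
--     that set instead of rescanning the whole list per candidate.
--     """
--     files = existing_files if existing_files else []
--     if filename not in files:
--         return filename
--     name, ext = filename.rsplit('.', 1) if '.' in filename else (filename, '')
--     prefix = name + '_'
--     suffix = '.' + ext if ext else ''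
--     lo, hi = len(prefix), len(suffix)
--     used = set()
--     for f in files:
--         if len(f) > lo + hi and f.startswith(prefix) and f.endswith(suffix):
--             used.add(f[lo:len(f) - hi])
--     k = 1
--     while str(k) in used:
--         k += 1
--     return prefix + str(k) + suffix
-- ===== Notes on version B (the rewrite author's own statement) =====
-- stated objective: alternative
-- what changed: Instead of generating candidate filenames and rescanning the whole existing_files list for each counter, B makes one pass over existing_files collecting the variable segments of entries shaped like name_<segment>ext into a set, then probes that set with str(k) until the first free counter.
import Mathlib
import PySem

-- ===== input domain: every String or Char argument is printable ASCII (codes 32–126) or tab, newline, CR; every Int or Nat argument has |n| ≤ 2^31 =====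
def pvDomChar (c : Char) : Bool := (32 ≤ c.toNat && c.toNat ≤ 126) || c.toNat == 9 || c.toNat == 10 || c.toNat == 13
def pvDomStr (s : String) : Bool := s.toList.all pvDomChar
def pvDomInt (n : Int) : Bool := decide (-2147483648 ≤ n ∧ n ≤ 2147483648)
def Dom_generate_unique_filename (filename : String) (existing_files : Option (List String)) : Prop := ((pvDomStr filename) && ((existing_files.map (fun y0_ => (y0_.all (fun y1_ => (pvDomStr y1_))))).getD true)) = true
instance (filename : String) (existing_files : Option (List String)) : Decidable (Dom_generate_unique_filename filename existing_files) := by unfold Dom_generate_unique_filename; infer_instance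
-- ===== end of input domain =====

-- B replaces A's generate-candidate-and-rescan-the-list loop by one pass that indexes the
-- numbered variants' variable segments into a set, then probes that set per counter.

-- ===== PORT A =====
-- shared helper: the line  name, ext = filename.rsplit('.', 1) if '.' in filename else (filename, '')
-- (identical in Source A and Source B)
def pvRsplitDot (filename : String) : String × String :=
  if PySem.Str.isIn "." filename then
    (PySem.Str.slice filename none (some (PySem.Str.rfind filename ".")),
     PySem.Str.slice filename (some (PySem.Str.rfind filename "." + 1)) none)
  else (filename, "")

-- A's 'while True' loop; the fuel argument only makes the recursion total:
-- fuel files.length + 1 is proved sufficient below, so the 0 branch is never reached.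
def pyALoop (files : List String) (name ext : String) (counter : Int) (fuel : Nat) : String :=
  match fuel with
  | 0 => ""
  | fuel + 1 =>
    let new_filename := if ext ≠ "" then name ++ "_" ++ PySem.Int.toStr counter ++ "." ++ ext
      else name ++ "_" ++ PySem.Int.toStr counter
    if new_filename ∈ files then pyALoop files name ext (counter + 1) fuel else new_filename

def generate_unique_filename (filename : String) (existing_files : Option (List String)) : String :=
  let files := existing_files.getD []
  if filename ∈ files then
    let ne := pvRsplitDot filename
    pyALoop files ne.1 ne.2 1 (files.length + 1)
  else filename

-- ===== PORT B =====
-- the one-pass set build:  for f in files: if len(f) > lo + hi and f.startswith(prefix)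
-- and f.endswith(suffix): used.add(f[lo:len(f)-hi])
def pvBUsed (files : List String) (lo hi : Nat) (pre suf : String) : PySem.Set String :=
  files.foldl (fun s f =>
    if lo + hi < f.length && PySem.Str.startswith f pre && PySem.Str.endswith f suf then
      PySem.Set.add s (PySem.Str.slice f (some (lo : Int)) (some ((f.length : Int) - (hi : Int))))
    else s) PySem.Set.empty

-- B's 'while str(k) in used: k += 1' then 'return prefix + str(k) + suffix';
-- fuel used.length + 1 is proved sufficient below, so the 0 branch is never reached.
def pyBLoop (used : PySem.Set String) (pre suf : String) (k : Int) (fuel : Nat) : String :=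
  match fuel with
  | 0 => ""
  | fuel + 1 =>
    if PySem.Set.contains used (PySem.Int.toStr k) then pyBLoop used pre suf (k + 1) fuel
    else pre ++ PySem.Int.toStr k ++ suf

def generate_unique_filename_alt (filename : String) (existing_files : Option (List String)) : String :=
  let files := existing_files.getD []
  if filename ∈ files then
    let ne := pvRsplitDot filename
    let pre := ne.1 ++ "_"
    let suf := if ne.2 ≠ "" then "." ++ ne.2 else ""
    let used := pvBUsed files pre.length suf.length pre suf
    pyBLoop used pre suf 1 (used.length + 1)
  else filename

-- ===== PRECONDITION & SPEC =====
def Spec_generate_unique_filename (filename : String) (existing_files : Option (List String)) (out : String) : Prop := out = generate_unique_filename_alt filename existing_files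
instance (filename : String) (existing_files : Option (List String)) (out : String) : Decidable (Spec_generate_unique_filename filename existing_files out) := by unfold Spec_generate_unique_filename; infer_instance

-- ===== CLAIM (what is proved, stated in full; the proofs are below) =====
def Claim_equal_generate_unique_filename : Prop := ∀ (filename : String) (existing_files : Option (List String)), Dom_generate_unique_filename filename existing_files → Spec_generate_unique_filename filename existing_files (generate_unique_filename filename existing_files)

-- ===== LEMMAS AND PROOFS =====

-- decimal-representation facts (for injectivity of str(k) on k ≥ 1)

theorem pvDigitChar_toNat (m : Nat) (h : m < 10) : (Nat.digitChar m).toNat = m + 48 := by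
  interval_cases m <;> rfl

theorem pvToDigitsCore_append : ∀ (fuel n : Nat) (ds : List Char),
    Nat.toDigitsCore 10 fuel n ds = Nat.toDigitsCore 10 fuel n [] ++ ds := by
  intro fuel
  induction fuel with
  | zero => intro n ds; simp [Nat.toDigitsCore]
  | succ fuel ih =>
    intro n ds
    simp only [Nat.toDigitsCore]
    by_cases h : n / 10 = 0
    · simp [h]
    · simp only [h, if_neg h]
      rw [ih (n / 10) (Nat.digitChar (n % 10) :: ds), ih (n / 10) [Nat.digitChar (n % 10)]]
      simp

def pvStep (a : Nat) (c : Char) : Nat := 10 * a + (c.toNat - 48)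

theorem pvVal_toDigitsCore : ∀ (fuel n a : Nat), n < 10 ^ fuel →
    (Nat.toDigitsCore 10 fuel n []).foldl pvStep a
      = a * 10 ^ (Nat.toDigitsCore 10 fuel n []).length + n := by
  intro fuel
  induction fuel with
  | zero =>
    intro n a h
    interval_cases n
    simp [Nat.toDigitsCore]
  | succ fuel ih =>
    intro n a h
    simp only [Nat.toDigitsCore]
    by_cases h0 : n / 10 = 0
    · have h10 : n % 10 < 10 := Nat.mod_lt _ (by norm_num)
      rw [if_pos h0]
      simp only [List.foldl, List.length_cons, List.length_nil, pvStep,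
        pvDigitChar_toNat _ h10, pow_one]
      omega
    · have hdiv : n / 10 < 10 ^ fuel := by
        rw [Nat.div_lt_iff_lt_mul (by norm_num)]
        calc n < 10 ^ (fuel + 1) := h
        _ = 10 ^ fuel * 10 := by ring
      simp only [if_neg h0]
      rw [pvToDigitsCore_append fuel (n / 10) [Nat.digitChar (n % 10)]]
      rw [List.foldl_append, ih (n / 10) a hdiv]
      simp [List.foldl, pvStep, pvDigitChar_toNat _ (Nat.mod_lt _ (by norm_num)),
        List.length_append, pow_succ]
      have : n % 10 + 10 * (n / 10) = n := by omega
      ring_nf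
      omega

theorem pvVal_toDigits (n : Nat) : (Nat.toDigits 10 n).foldl pvStep 0 = n := by
  have h : n < 10 ^ (n + 1) := by
    calc n < 10 ^ n := Nat.lt_pow_self (by norm_num)
    _ ≤ 10 ^ (n + 1) := Nat.pow_le_pow_right (by norm_num) (by omega)
  have := pvVal_toDigitsCore (n + 1) n 0 h
  simpa [Nat.toDigits] using this

theorem pvToDigits_inj {m n : Nat} (h : Nat.toDigits 10 m = Nat.toDigits 10 n) : m = n := by
  have := pvVal_toDigits m
  rw [h, pvVal_toDigits n] at this
  omega

theorem pvToDigits_ne_nil (n : Nat) : Nat.toDigits 10 n ≠ [] := by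
  show Nat.toDigitsCore 10 (n + 1) n [] ≠ []
  simp only [Nat.toDigitsCore]
  by_cases h : n / 10 = 0
  · simp [h]
  · simp only [if_neg h]
    rw [pvToDigitsCore_append]
    simp

theorem pvToChars_nonneg (k : Int) (h : 0 ≤ k) :
    PySem.Int.toChars k = Nat.toDigits 10 k.toNat := by
  simp [PySem.Int.toChars, not_lt.mpr h]

theorem pvToStr_toList (k : Int) (h : 0 ≤ k) :
    (PySem.Int.toStr k).toList = Nat.toDigits 10 k.toNat := by
  rw [PySem.Int.toList_toStr, pvToChars_nonneg k h]

theorem pvToStr_inj {a b : Int} (ha : 0 ≤ a) (hb : 0 ≤ b)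
    (h : PySem.Int.toStr a = PySem.Int.toStr b) : a = b := by
  have h' : (PySem.Int.toStr a).toList = (PySem.Int.toStr b).toList := by rw [h]
  rw [pvToStr_toList a ha, pvToStr_toList b hb] at h'
  have := pvToDigits_inj h'
  omega

theorem pvToStr_ne_nil (k : Int) : (PySem.Int.toStr k).toList ≠ [] := by
  by_cases h : 0 ≤ k
  · rw [pvToStr_toList k h]; exact pvToDigits_ne_nil _
  · rw [PySem.Int.toList_toStr]
    simp [PySem.Int.toChars, show k < 0 by omega]

-- pigeonhole: an injective stream of strings must leave a list

theorem pvNodupSubsetLength {l1 l2 : List String} (h : l1.Nodup) (hs : l1 ⊆ l2) :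
    l1.length ≤ l2.length := by
  classical
  calc l1.length = l1.toFinset.card := (List.toFinset_card_of_nodup h).symm
  _ ≤ l2.toFinset.card := Finset.card_le_card (by
      intro x hx; simp only [List.mem_toFinset] at *; exact hs hx)
  _ ≤ l2.length := l2.toFinset_card_le

theorem pvPigeon (g : Nat → String) (hg : Function.Injective g) (l : List String) :
    ∃ i, i ≤ l.length ∧ g i ∉ l := by
  by_contra h
  push_neg at h
  have hsub : ((List.range (l.length + 1)).map g) ⊆ l := by
    intro x hx
    simp only [List.mem_map, List.mem_range] at hx
    obtain ⟨i, hi, rfl⟩ := hx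
    exact h i (by omega)
  have hnd : ((List.range (l.length + 1)).map g).Nodup :=
    (List.nodup_range).map hg
  have := pvNodupSubsetLength hnd hsub
  simp at this

-- membership in B's set of segments

theorem pvMem_foldl_add (files : List String) (c : String → Bool) (m : String → String)
    (s0 : PySem.Set String) (x : String) :
    x ∈ files.foldl (fun s f => if c f then PySem.Set.add s (m f) else s) s0 ↔
      x ∈ s0 ∨ ∃ f ∈ files, c f = true ∧ m f = x := by
  induction files generalizing s0 with
  | nil => simp
  | cons f fs ih =>
    simp only [List.foldl_cons, List.mem_cons]
    by_cases hc : c f = true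
    · rw [if_pos hc, ih]
      simp only [PySem.Set.mem_add]
      constructor
      · rintro (⟨h | rfl⟩ | ⟨g, hg, hcg, hmg⟩)
        · exact Or.inl h
        · exact Or.inr ⟨f, Or.inl rfl, hc, rfl⟩
        · exact Or.inr ⟨g, Or.inr hg, hcg, hmg⟩
      · rintro (h | ⟨g, (rfl | hg), hcg, hmg⟩)
        · exact Or.inl (Or.inl h)
        · exact Or.inl (Or.inr hmg.symm)
        · exact Or.inr ⟨g, hg, hcg, hmg⟩
    · rw [if_neg hc, ih]
      constructor
      · rintro (h | ⟨g, hg, hcg, hmg⟩)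
        · exact Or.inl h
        · exact Or.inr ⟨g, Or.inr hg, hcg, hmg⟩
      · rintro (h | ⟨g, (rfl | hg), hcg, hmg⟩)
        · exact Or.inl h
        · exact absurd hcg hc
        · exact Or.inr ⟨g, hg, hcg, hmg⟩

-- extracting the middle segment of pre ++ mid ++ suf

theorem pvSlice_mid (pre suf : String) (mid : List Char) (f : String)
    (hf : f.toList = pre.toList ++ mid ++ suf.toList) :
    PySem.Str.slice f (some (pre.length : Int))
      (some ((f.length : Int) - (suf.length : Int))) = String.ofList mid := by
  have hlen : f.length = pre.length + mid.length + suf.length := by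
    have hfl := congrArg List.length hf
    simp [String.length_toList] at hfl
    omega
  rw [← String.toList_inj, String.toList_ofList, PySem.Str.toList_slice,
    PySem.Chars.slice_eq_listSlice]
  have hb : ((f.length : Int) - (suf.length : Int)) = ((pre.length + mid.length : Nat) : Int) := by
    push_cast
    omega
  rw [hb, PySem.List.slice_natCast, hf]
  rw [List.append_assoc]
  rw [show pre.length = pre.toList.length from String.length_toList.symm, List.drop_left]
  have hpm : pre.toList.length + mid.length - pre.toList.length = mid.length := by omega
  rw [hpm, List.take_left]

theorem pvCond_of_cand (pre suf mids : String) (hmid : mids.toList ≠ []) :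
    (pre.length + suf.length < (pre ++ mids ++ suf).length
      && PySem.Str.startswith (pre ++ mids ++ suf) pre
      && PySem.Str.endswith (pre ++ mids ++ suf) suf) = true := by
  have htl : (pre ++ mids ++ suf).toList = pre.toList ++ mids.toList ++ suf.toList := by
    simp [String.toList_append]
  have hlen : (pre ++ mids ++ suf).length
      = pre.length + mids.length + suf.length := by
    rw [String.length_append, String.length_append]
  have hm1 : 1 ≤ mids.length := by
    have h0 : 0 < mids.toList.length := List.length_pos_of_ne_nil hmid
    simpa [String.length_toList] using h0
  simp only [Bool.and_eq_true, decide_eq_true_eq, PySem.Str.startswith_eq,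
    PySem.Str.endswith_eq, PySem.Chars.startswith_iff, PySem.Chars.endswith_iff, htl, hlen]
  refine ⟨⟨by omega, ?_⟩, ?_⟩
  · exact ⟨mids.toList ++ suf.toList, by simp⟩
  · exact ⟨pre.toList ++ mids.toList, by simp⟩

theorem pvMem_used_iff (files : List String) (pre suf : String) (k : Int) (hk : 1 ≤ k) :
    PySem.Set.contains (pvBUsed files pre.length suf.length pre suf) (PySem.Int.toStr k) = true
      ↔ (pre ++ PySem.Int.toStr k ++ suf) ∈ files := by
  rw [PySem.Set.contains_iff]
  unfold pvBUsed
  rw [pvMem_foldl_add files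
    (fun f => pre.length + suf.length < f.length
      && PySem.Str.startswith f pre && PySem.Str.endswith f suf)
    (fun f => PySem.Str.slice f (some (pre.length : Int))
      (some ((f.length : Int) - (suf.length : Int))))]
  simp only [PySem.Set.empty]
  constructor
  · rintro (h | ⟨f, hf, hcond, hslice⟩)
    · simp at h
    · simp only [Bool.and_eq_true, decide_eq_true_eq, PySem.Str.startswith_eq,
        PySem.Str.endswith_eq, PySem.Chars.startswith_iff, PySem.Chars.endswith_iff] at hcond
      obtain ⟨⟨hlen, hpref⟩, hsuf⟩ := hcond
      obtain ⟨r, hr⟩ := hpref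
      obtain ⟨q, hq⟩ := hsuf
      have hflen : f.toList.length = f.length := String.length_toList
      have hqlen : q.length + suf.length = f.length := by
        have := congrArg List.length hq
        simpa [String.length_toList] using this
      have hloq : pre.length ≤ q.length := by omega
      have hpq : pre.toList = q.take pre.length := by
        have h1 : pre.toList <+: q ++ suf.toList := by rw [hq]; exact ⟨r, hr⟩
        have h2 := List.prefix_iff_eq_take.mp h1
        rw [List.take_append_of_le_length (by simpa [String.length_toList] using hloq)] at h2
        exact h2
      set mid := q.drop pre.length with hmid
      have hqdecomp : q = pre.toList ++ mid := by
        conv_lhs => rw [← List.take_append_drop pre.length q]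
        rw [← hpq]
      have hfdecomp : f.toList = pre.toList ++ mid ++ suf.toList := by
        rw [← hq, hqdecomp]
      have hsl := pvSlice_mid pre suf mid f hfdecomp
      rw [hsl] at hslice
      have hmideq : mid = (PySem.Int.toStr k).toList := by
        rw [← hslice, String.toList_ofList]
      have hfeq : f = pre ++ PySem.Int.toStr k ++ suf := by
        rw [← String.toList_inj, hfdecomp, hmideq]
        simp [String.toList_append]
      rw [← hfeq]
      exact hf
  · intro hmem
    refine Or.inr ⟨pre ++ PySem.Int.toStr k ++ suf, hmem, ?_, ?_⟩
    · exact pvCond_of_cand pre suf (PySem.Int.toStr k) (pvToStr_ne_nil k)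
    · have hfd : (pre ++ PySem.Int.toStr k ++ suf).toList
          = pre.toList ++ (PySem.Int.toStr k).toList ++ suf.toList := by
        simp [String.toList_append]
      rw [pvSlice_mid pre suf (PySem.Int.toStr k).toList _ hfd, String.ofList_toList]

-- the two loops agree

theorem pvLockstep (files : List String) (used : PySem.Set String) (name ext pre suf : String)
    (hc : ∀ k : Int, 1 ≤ k →
      (if ext ≠ "" then name ++ "_" ++ PySem.Int.toStr k ++ "." ++ ext
        else name ++ "_" ++ PySem.Int.toStr k) = pre ++ PySem.Int.toStr k ++ suf)
    (hm : ∀ k : Int, 1 ≤ k →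
      (PySem.Set.contains used (PySem.Int.toStr k) = true ↔ (pre ++ PySem.Int.toStr k ++ suf) ∈ files)) :
    ∀ (fA fB : Nat) (c : Int), 1 ≤ c →
      (∃ i : Nat, i < fA ∧ i < fB ∧ (pre ++ PySem.Int.toStr (c + (i : Int)) ++ suf) ∉ files) →
      pyALoop files name ext c fA = pyBLoop used pre suf c fB := by
  intro fA
  induction fA with
  | zero => rintro fB c hc1 ⟨i, hi, _, _⟩; omega
  | succ fA ih =>
    rintro fB c hc1 ⟨i, hiA, hiB, hnot⟩
    cases fB with
    | zero => omega
    | succ fB =>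
      simp only [pyALoop, pyBLoop]
      rw [hc c hc1]
      by_cases hmem : (pre ++ PySem.Int.toStr c ++ suf) ∈ files
      · have hcont : PySem.Set.contains used (PySem.Int.toStr c) = true := (hm c hc1).mpr hmem
        rw [if_pos hmem, hcont]
        simp only [if_true]
        have hi0 : i ≠ 0 := by
          rintro rfl
          exact hnot (by simpa using hmem)
        obtain ⟨i', rfl⟩ : ∃ i', i = i' + 1 := ⟨i - 1, by omega⟩
        apply ih fB (c + 1) (by omega)
        refine ⟨i', by omega, by omega, ?_⟩
        have : c + 1 + (i' : Int) = c + ((i' + 1 : Nat) : Int) := by push_cast; ring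
        rw [this]
        exact hnot
      · have hcont : PySem.Set.contains used (PySem.Int.toStr c) = false := by
          cases hcb : PySem.Set.contains used (PySem.Int.toStr c) with
          | true => exact absurd ((hm c hc1).mp hcb) hmem
          | false => rfl
        rw [if_neg hmem, hcont]
        simp

-- assembling the top level

theorem pvCand_eq (name ext : String) (k : Int) :
    (if ext ≠ "" then name ++ "_" ++ PySem.Int.toStr k ++ "." ++ ext
      else name ++ "_" ++ PySem.Int.toStr k)
    = (name ++ "_") ++ PySem.Int.toStr k ++ (if ext ≠ "" then "." ++ ext else "") := by
  by_cases h : ext = "" <;>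
    simp [h, ← String.toList_inj, String.toList_append]

theorem pvCandInj (pre suf : String) :
    Function.Injective (fun i : Nat => pre ++ PySem.Int.toStr (1 + (i : Int)) ++ suf) := by
  intro i j h
  simp only at h
  rw [← String.toList_inj] at h
  simp only [String.toList_append] at h
  have h2 := List.append_cancel_left (List.append_cancel_right h)
  rw [String.toList_inj] at h2
  have h3 := pvToStr_inj (a := 1 + (i : Int)) (b := 1 + (j : Int)) (by omega) (by omega) h2
  omega

theorem pvToStrInj' : Function.Injective (fun i : Nat => PySem.Int.toStr (1 + (i : Int))) := by
  intro i j h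
  simp only at h
  have h3 := pvToStr_inj (a := 1 + (i : Int)) (b := 1 + (j : Int)) (by omega) (by omega) h
  omega

-- ===== VERDICT (by name: the statement is the Claim_ definition above) =====
theorem generate_unique_filename_spec : Claim_equal_generate_unique_filename := by
  unfold Claim_equal_generate_unique_filename
  intro filename existing_files _dom
  unfold Spec_generate_unique_filename generate_unique_filename generate_unique_filename_alt
  simp only []
  by_cases hmem : filename ∈ existing_files.getD []
  · rw [if_pos hmem, if_pos hmem]
    set files := existing_files.getD [] with hfiles
    set name := (pvRsplitDot filename).1 with hname
    set ext := (pvRsplitDot filename).2 with hext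
    set pre := name ++ "_" with hpre
    set suf := (if ext ≠ "" then "." ++ ext else "") with hsuf
    set used := pvBUsed files pre.length suf.length pre suf with hused
    obtain ⟨iA, hiA, hiAnot⟩ := pvPigeon _ (pvCandInj pre suf) files
    obtain ⟨iB, hiB, hiBnot⟩ := pvPigeon _ pvToStrInj' used
    have hiBnot' : (pre ++ PySem.Int.toStr (1 + (iB : Int)) ++ suf) ∉ files := by
      intro hmm
      have hct := (pvMem_used_iff files pre suf (1 + (iB : Int)) (by omega)).mpr hmm
      rw [PySem.Set.contains_iff] at hct
      exact hiBnot hct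
    have hex : ∃ i : Nat, (pre ++ PySem.Int.toStr (1 + (i : Int)) ++ suf) ∉ files :=
      ⟨iA, hiAnot⟩
    have hb1 : Nat.find hex ≤ iA := Nat.find_min' hex hiAnot
    have hb2 : Nat.find hex ≤ iB := Nat.find_min' hex hiBnot'
    apply pvLockstep files used name ext pre suf
      (fun k _ => pvCand_eq name ext k)
      (fun k hk => pvMem_used_iff files pre suf k hk)
      (files.length + 1) (used.length + 1) 1 (by norm_num)
    exact ⟨Nat.find hex, by omega, by omega, Nat.find_spec hex⟩
  · rw [if_neg hmem, if_neg hmem]
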